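-- pv_equiv track=rewrite | github.com/yunijeong5/CodingPractice | ibm.py | subsetA
-- ===== SOURCE A (Python) =====
-- def subsetA(arr):
--     # Write your code here
--     p = len(arr)-1
--     sarr = sorted(arr)
--     while sum(sarr[:p]) >= sum(sarr[p:]):
--         p -= 1
--
--     A = set(sarr[p:])
--     B = set(sarr[:p])
--     inter = A.intersection(B)
--
--     if inter != set():
--         while inter in sarr[:p]:
--             p -= 1
--
--     return sarr[p:] # this is Greedy so it doesn't work
-- ===== SOURCE B (Python) =====
-- def subsetA(arr):
--     sarr = sorted(arr)
--     total = sum(sarr)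
--     suffix = 0
--     for p in range(len(sarr) - 1, -1, -1):
--         suffix += sarr[p]
--         if total - suffix < suffix:
--             return sarr[p:]
--     return sarr
-- ===== Notes on version B (the rewrite author's own statement) =====
-- stated objective: faster
-- what changed: B replaces A's while loop that recomputes sum(sarr[:p]) and sum(sarr[p:]) from scratch on every iteration (O(n) per step, O(n^2) total) by a single descending scan maintaining a running suffix sum, O(1) per step after the sort; the dead set-intersection block of A (its 'while inter in sarr[:p]' can never fire since a set never equals an int) is dropped. (Pre_ excludes exactly the inputs on which A's while loop never terminates — A returns no value there; B returns the whole sorted list.)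
import Mathlib
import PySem

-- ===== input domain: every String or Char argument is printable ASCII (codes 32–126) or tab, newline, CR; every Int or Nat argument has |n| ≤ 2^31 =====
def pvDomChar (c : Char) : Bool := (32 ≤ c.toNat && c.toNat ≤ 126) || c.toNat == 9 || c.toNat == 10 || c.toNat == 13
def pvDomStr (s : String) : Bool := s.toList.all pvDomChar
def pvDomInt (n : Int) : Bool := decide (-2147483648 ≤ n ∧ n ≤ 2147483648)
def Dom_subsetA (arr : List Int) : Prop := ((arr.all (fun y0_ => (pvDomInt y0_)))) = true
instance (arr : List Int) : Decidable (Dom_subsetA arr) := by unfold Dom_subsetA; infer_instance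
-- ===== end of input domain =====

-- B replaces A's per-step O(n) recomputation of sum(sarr[:p]) and sum(sarr[p:]) by one descending
-- scan with a running suffix sum; A's post-loop set block is dead code ('inter in sarr[:p]'
-- compares a set with ints, always False in Python). A diverges outside Pre_; nothing is claimed there.

-- ===== PORT A =====
-- the 'while sum(sarr[:p]) >= sum(sarr[p:]): p -= 1' loop; inside Pre_ it stops before the
-- fuel (arr.length iterations, starting at p = len(arr)-1) runs out (proved in loopA_eq_altGo)
def subsetALoop (sarr : List Int) : Nat → Int → Int
  | 0, p => p
  | fuel+1, p =>
      if (PySem.List.slice sarr none (some p)).sum ≥ (PySem.List.slice sarr (some p) none).sum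
      then subsetALoop sarr fuel (p - 1)
      else p

def subsetA (arr : List Int) : List Int :=
  let sarr := PySem.List.sorted arr (fun x => x) false
  let p := subsetALoop sarr arr.length ((arr.length : Int) - 1)
  let A := PySem.Set.ofList (PySem.List.slice sarr (some p) none)
  let B := PySem.Set.ofList (PySem.List.slice sarr none (some p))
  let inter := PySem.Set.inter A B
  -- 'if inter != set(): while inter in sarr[:p]: p -= 1' — in Python a set object never equals
  -- an int, so 'inter in sarr[:p]' is always False and the inner loop never runs; p is unchanged
  let _ := inter
  PySem.List.slice sarr (some p) none

-- ===== PORT B =====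
-- the 'for p in range(len(sarr)-1, -1, -1)' early-return scan of Source B; k+1 = remaining count, p = k
def subsetAAltGo (sarr : List Int) (total : Int) : Nat → Int → List Int
  | 0, _ => sarr
  | k+1, suffix =>
      let suffix' := suffix + sarr.getD k 0   -- sarr[p] with p = k, always in range here
      if total - suffix' < suffix' then sarr.drop k
      else subsetAAltGo sarr total k suffix'

def subsetA_alt (arr : List Int) : List Int :=
  let sarr := PySem.List.sorted arr (fun x => x) false
  subsetAAltGo sarr sarr.sum sarr.length 0

-- ===== PRECONDITION & SPEC =====
-- Pre_ excludes exactly the inputs on which A's while loop never terminates (A returns no value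
-- there): those where no p < len(arr) has 2*sum(sorted(arr)[:p]) < sum(arr).
def Pre_subsetA (arr : List Int) : Prop :=
  ∃ p ∈ List.range arr.length,
    2 * ((PySem.List.sorted arr (fun x => x) false).take p).sum < arr.sum
instance (arr : List Int) : Decidable (Pre_subsetA arr) := by unfold Pre_subsetA; infer_instance

def pvWitness_subsetA : List Int := [1, 2, 3]

def Spec_subsetA (arr : List Int) (out : List Int) : Prop := out = subsetA_alt arr
instance (arr : List Int) (out : List Int) : Decidable (Spec_subsetA arr out) := by unfold Spec_subsetA; infer_instance

-- ===== CLAIM (what is proved, stated in full; the proofs are below) =====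
def Claim_equal_subsetA : Prop := ∀ (arr : List Int), Dom_subsetA arr → Pre_subsetA arr → Spec_subsetA arr (subsetA arr)

-- ===== LEMMAS AND PROOFS =====

lemma loopA_succ (sarr : List Int) (fuel : Nat) (p : Int) :
    subsetALoop sarr (fuel+1) p
      = if (PySem.List.slice sarr none (some p)).sum ≥ (PySem.List.slice sarr (some p) none).sum
        then subsetALoop sarr fuel (p - 1) else p := rfl

lemma altGo_succ (sarr : List Int) (total : Int) (k : Nat) (suffix : Int) :
    subsetAAltGo sarr total (k+1) suffix
      = if total - (suffix + sarr.getD k 0) < suffix + sarr.getD k 0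
        then sarr.drop k else subsetAAltGo sarr total k (suffix + sarr.getD k 0) := rfl

lemma drop_sum_succ (sarr : List Int) (k : Nat) (hk : k < sarr.length) :
    (sarr.drop k).sum = sarr.getD k 0 + (sarr.drop (k+1)).sum := by
  rw [List.drop_eq_getElem_cons hk, List.sum_cons, List.getD_eq_getElem sarr 0 hk]

lemma take_drop_sum (sarr : List Int) (k : Nat) :
    (sarr.take k).sum + (sarr.drop k).sum = sarr.sum := by
  rw [← List.sum_append, List.take_append_drop]

-- core: inside Pre_, A's fueled while loop and B's scan agree, scanning p = k, k-1, …, 0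
lemma loopA_eq_altGo (sarr : List Int) (k : Nat) (hk : k < sarr.length)
    (hex : ∃ j, j ≤ k ∧ 2 * (sarr.take j).sum < sarr.sum) :
    PySem.List.slice sarr (some (subsetALoop sarr (k+1) (k : Int))) none
      = subsetAAltGo sarr sarr.sum (k+1) ((sarr.drop (k+1)).sum) := by
  induction k with
  | zero =>
      have hS : 0 < sarr.sum := by
        obtain ⟨j, hj, hlt⟩ := hex
        interval_cases j
        simpa using hlt
      have hd : (sarr.drop 0).sum = sarr.getD 0 0 + (sarr.drop (0+1)).sum := drop_sum_succ sarr 0 hk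
      rw [List.drop_zero] at hd
      rw [loopA_succ, altGo_succ, PySem.List.slice_to_natCast, PySem.List.slice_from_natCast]
      have hcA : ¬ ((sarr.take 0).sum ≥ (sarr.drop 0).sum) := by
        simp only [List.take_zero, List.sum_nil, List.drop_zero]
        omega
      have hcB : sarr.sum - ((sarr.drop (0+1)).sum + sarr.getD 0 0)
          < (sarr.drop (0+1)).sum + sarr.getD 0 0 := by omega
      rw [if_neg hcA, if_pos hcB, PySem.List.slice_from_natCast]
  | succ n ih =>
      have hd : (sarr.drop (n+1)).sum = sarr.getD (n+1) 0 + (sarr.drop (n+1+1)).sum :=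
        drop_sum_succ sarr (n+1) hk
      have hsum := take_drop_sum sarr (n+1)
      rw [loopA_succ, altGo_succ, PySem.List.slice_to_natCast, PySem.List.slice_from_natCast]
      by_cases hc : (sarr.take (n+1)).sum ≥ (sarr.drop (n+1)).sum
      · rw [if_pos hc, if_neg (by omega)]
        have hp : ((n+1 : Nat) : Int) - 1 = ((n : Nat) : Int) := by push_cast; ring
        have harg : (sarr.drop (n+1+1)).sum + sarr.getD (n+1) 0 = (sarr.drop (n+1)).sum := by
          omega
        rw [hp, harg]
        refine ih (by omega) ?_
        obtain ⟨j, hj, hlt⟩ := hex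
        refine ⟨j, ?_, hlt⟩
        rcases Nat.lt_or_ge j (n+1) with h | h
        · omega
        · exfalso
          have hjk : j = n + 1 := by omega
          subst hjk
          omega
      · rw [if_neg hc, if_pos (by omega), PySem.List.slice_from_natCast]

-- ===== VERDICT (by name: the statement is the Claim_ definition above) =====
theorem subsetA_spec : Claim_equal_subsetA := by
  intro arr _ hpre
  unfold Spec_subsetA subsetA subsetA_alt
  obtain ⟨p, hp, hlt⟩ := hpre
  rw [List.mem_range] at hp
  set sarr := PySem.List.sorted arr (fun x => x) false with hs
  have hlen : sarr.length = arr.length := PySem.List.length_sorted ..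
  have hsum : sarr.sum = arr.sum := (PySem.List.sorted_perm arr (fun x => x) false).sum_eq
  obtain ⟨m, hm⟩ : ∃ m, arr.length = m + 1 := ⟨arr.length - 1, by omega⟩
  have hc2 : ((m + 1 : Nat) : Int) - 1 = ((m : Nat) : Int) := by push_cast; ring
  have key := loopA_eq_altGo sarr m (by omega) ⟨p, by omega, by rw [hsum]; exact hlt⟩
  have hdropn : (sarr.drop (m+1)).sum = 0 := by
    rw [List.drop_eq_nil_of_le (by omega)]
    rfl
  rw [hdropn] at key
  simp only [hlen, hm, hc2]
  exact key
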